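-- pv_equiv track=rewrite | github.com/mirenk0/Algorithmic-Problems | 10-DynamicProgramming/countseq.py | count
-- ===== SOURCE A (Python) =====
-- def count(t):
--     n = len(t)
--     dp = [1] * n
--     total = 1
--
--     for i in range(1, n):
--         for j in range(i):
--             if t[i] > t[j]:
--                 dp[i] += dp[j]
--         total += dp[i]
--
--     return total
-- ===== SOURCE B (Python) =====
-- def count(t):
--     # Aggregate subsequence counts by distinct ending value in a dict:
--     # for each x, the number of increasing subsequences ending at this x is
--     # 1 + sum of counts over all distinct smaller values seen so far.
--     ends = {}
--     total = 0
--     for x in t: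
--         c = 1 + sum(cnt for v, cnt in ends.items() if v < x)
--         ends[x] = ends.get(x, 0) + c
--         total += c
--     return total
-- ===== Notes on version B (the rewrite author's own statement) =====
-- stated objective: alternative
-- what changed: Replaces the index-based dp array with nested range loops by a single pass that aggregates subsequence counts per distinct ending value in a dict (inner scan over distinct values, not over all previous indices), and starts the total at 0 instead of 1.
-- intended difference: On the empty list A returns 1 (the accumulator is seeded with 1 even though there is no element), while B returns 0, the actual number of nonempty increasing subsequences of an empty sequence. — e.g. on count([]): A returns 1, B returns 0
import Mathlib
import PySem

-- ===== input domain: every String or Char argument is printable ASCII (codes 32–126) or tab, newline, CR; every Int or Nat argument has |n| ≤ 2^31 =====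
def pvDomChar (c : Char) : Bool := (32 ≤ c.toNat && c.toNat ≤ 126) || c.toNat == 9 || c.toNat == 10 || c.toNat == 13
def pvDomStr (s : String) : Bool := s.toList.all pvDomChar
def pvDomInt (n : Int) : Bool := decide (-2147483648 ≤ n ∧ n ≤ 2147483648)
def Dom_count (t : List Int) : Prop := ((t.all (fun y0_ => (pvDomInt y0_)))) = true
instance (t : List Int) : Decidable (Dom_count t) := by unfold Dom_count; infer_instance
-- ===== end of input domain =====

-- B aggregates counts per distinct ending value in a dict instead of keeping a dp entry per index; same results on nonempty input, and 0 (not A's seeded 1) on the empty list.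

-- ===== PORT A =====
-- inner loop body: 'if t[i] > t[j]: dp[i] += dp[j]'
def countInner (t : List Int) (i : Int) (dp : List Int) (j : Int) : List Int :=
  if PySem.List.pyGetD t i 0 > PySem.List.pyGetD t j 0 then
    PySem.List.pySetD dp i (PySem.List.pyGetD dp i 0 + PySem.List.pyGetD dp j 0)
  else dp

-- outer loop body: 'for j in range(i): …'; then 'total += dp[i]'
def countOuter (t : List Int) (st : List Int × Int) (i : Int) : List Int × Int :=
  let dp' := (PySem.List.pyRange 0 i 1).foldl (countInner t i) st.1
  (dp', st.2 + PySem.List.pyGetD dp' i 0)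

def count (t : List Int) : Int :=
  ((PySem.List.pyRange 1 (t.length : Int) 1).foldl (countOuter t)
    (List.replicate t.length 1, 1)).2

-- ===== PORT B =====
-- loop body: c = 1 + sum(cnt for v, cnt in ends.items() if v < x); ends[x] = ends.get(x, 0) + c; total += c
def countAltStep (st : PySem.Dict Int Int × Int) (x : Int) : PySem.Dict Int Int × Int :=
  let c := 1 + st.1.items.foldl (fun s p => if p.1 < x then s + p.2 else s) 0
  (st.1.modify x 0 (· + c), st.2 + c)

def count_alt (t : List Int) : Int :=
  (t.foldl countAltStep (PySem.Dict.empty, 0)).2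

-- ===== PRECONDITION & SPEC =====
-- On the empty list A returns 1 (its accumulator is seeded with 1 although no element exists),
-- while B returns 0, the actual number of nonempty increasing subsequences of an empty sequence.
def D_count (t : List Int) : Prop := t = []
instance (t : List Int) : Decidable (D_count t) := by unfold D_count; infer_instance

def Spec_count (t : List Int) (out : Int) : Prop := ¬ D_count t → out = count_alt t
instance (t : List Int) (out : Int) : Decidable (Spec_count t out) := by unfold Spec_count; infer_instance

def pvDiffWitness_count : List Int := []
def pvDiffWitnessOut_count : Int × Int := (1, 0)

-- ===== CLAIM (what is proved, stated in full; the proofs are below) =====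
def Claim_unchanged_count : Prop := ∀ (t : List Int), Dom_count t → Spec_count t (count t)
def Claim_changed_count : Prop := Dom_count (pvDiffWitness_count) ∧ D_count (pvDiffWitness_count) ∧ count (pvDiffWitness_count) = pvDiffWitnessOut_count.1 ∧ count_alt (pvDiffWitness_count) = pvDiffWitnessOut_count.2 ∧ pvDiffWitnessOut_count.1 ≠ pvDiffWitnessOut_count.2
def Claim_exact_count : Prop := ∀ (t : List Int), Dom_count t → D_count t → count t ≠ count_alt t

-- ===== LEMMAS AND PROOFS =====

-- reference model: the list of (value, dp-count) pairs for the processed prefix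
def condSum (P : List (Int × Int)) (x : Int) : Int :=
  P.foldl (fun s p => if p.1 < x then s + p.2 else s) 0

def stepP (P : List (Int × Int)) (x : Int) : List (Int × Int) :=
  P ++ [(x, 1 + condSum P x)]

def pairs (t : List Int) : List (Int × Int) := t.foldl stepP []

def sndSum (P : List (Int × Int)) : Int := (P.map (·.2)).sum

lemma condSum_eq_sum (P : List (Int × Int)) (x : Int) :
    condSum P x = (P.map (fun p => if p.1 < x then p.2 else 0)).sum := by
  have aux : ∀ (P : List (Int × Int)) (s : Int),
      P.foldl (fun s p => if p.1 < x then s + p.2 else s) s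
        = s + (P.map (fun p => if p.1 < x then p.2 else 0)).sum := by
    intro P
    induction P with
    | nil => intro s; simp
    | cons p P ih =>
      intro s
      simp only [List.foldl_cons, List.map_cons, List.sum_cons, ih]
      split_ifs <;> ring
  simpa [condSum] using aux P 0

lemma condSum_append (P Q : List (Int × Int)) (x : Int) :
    condSum (P ++ Q) x = condSum P x + condSum Q x := by
  simp [condSum_eq_sum]

lemma sum_map_update (ks : List Int) (hnd : ks.Nodup) (x : Int) (hx : x ∈ ks)
    (g : Int → Int) (δ : Int) :
    (ks.map (fun k => if k = x then g k + δ else g k)).sum = (ks.map g).sum + δ := by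
  induction ks with
  | nil => cases hx
  | cons a ks ih =>
    simp only [List.nodup_cons] at hnd
    rcases List.mem_cons.1 hx with h | h
    · subst h
      have : ks.map (fun k => if k = x then g k + δ else g k) = ks.map g := by
        apply List.map_congr_left
        intro k hk
        have : k ≠ x := fun he => hnd.1 (he ▸ hk)
        simp [this]
      simp only [List.map_cons, List.sum_cons, this]
      simp only [if_true]
      ring
    · have hax : a ≠ x := fun he => hnd.1 (he ▸ h)
      simp only [List.map_cons, List.sum_cons, if_neg hax, ih hnd.2 h]
      ring

-- ## B side
lemma condSum_insert (d : PySem.Dict Int Int) (hnd : d.keys.Nodup) (x c y : Int) :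
    condSum ((d.insert x (d.getD x 0 + c)).items) y
      = condSum d.items y + (if x < y then c else 0) := by
  have hnd' : ((d.insert x (d.getD x 0 + c)).keys).Nodup :=
    PySem.Dict.nodup_keys_insert d x _ hnd
  by_cases hc : d.contains x = true
  · have hk := PySem.Dict.keys_insert_of_contains d (d.getD x 0 + c) hc
    rw [PySem.Dict.items_eq_map_keys _ hnd' 0, hk, PySem.Dict.items_eq_map_keys d hnd 0,
      condSum_eq_sum, condSum_eq_sum, List.map_map, List.map_map]
    have hmem : x ∈ d.keys := (PySem.Dict.contains_iff_mem_keys d x).1 hc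
    have hfun : ((fun p : Int × Int => if p.1 < y then p.2 else 0) ∘
        (fun k => (k, (d.insert x (d.getD x 0 + c)).getD k 0)))
        = (fun k => if k = x then ((fun k => if k < y then d.getD k 0 else 0) k
              + (if x < y then c else 0))
            else (fun k => if k < y then d.getD k 0 else 0) k) := by
      funext k
      simp only [Function.comp, PySem.Dict.getD_insert]
      by_cases hkx : k = x
      · subst hkx; split_ifs <;> ring
      · simp [hkx]
    rw [hfun, sum_map_update d.keys hnd x hmem _ _]
    congr 1
  · have hcf : d.contains x = false := by simpa using hc
    have hk := PySem.Dict.keys_insert_of_not_contains d (d.getD x 0 + c) hcf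
    rw [PySem.Dict.items_eq_map_keys _ hnd' 0, hk, PySem.Dict.items_eq_map_keys d hnd 0,
      condSum_eq_sum, condSum_eq_sum, List.map_map, List.map_map, List.map_append,
      List.sum_append]
    have hmem : x ∉ d.keys := fun h =>
      by simp [(PySem.Dict.contains_iff_mem_keys d x).2 h] at hc
    congr 1
    · apply congrArg
      apply List.map_congr_left
      intro k hk'
      have hkx : k ≠ x := fun he => hmem (he ▸ hk')
      simp [Function.comp, PySem.Dict.getD_insert, hkx]
    · simp [Function.comp, PySem.Dict.getD_insert,
        PySem.Dict.getD_of_not_contains d 0 hcf]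

lemma countAlt_loop : ∀ (r : List Int) (d : PySem.Dict Int Int) (tot : Int) (P : List (Int × Int)),
    d.keys.Nodup → (∀ y, condSum d.items y = condSum P y) →
    (r.foldl countAltStep (d, tot)).2 + sndSum P = tot + sndSum (r.foldl stepP P) := by
  intro r
  induction r with
  | nil => intro d tot P _ _; simp
  | cons x r ih =>
    intro d tot P hnd H
    simp only [List.foldl_cons]
    have hc : (1 : Int) + condSum d.items x = 1 + condSum P x := by rw [H]
    have hstep : countAltStep (d, tot) x
        = (d.modify x 0 (· + (1 + condSum P x)), tot + (1 + condSum P x)) := by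
      simp only [countAltStep]
      have : d.items.foldl (fun s p => if p.1 < x then s + p.2 else s) 0
          = condSum d.items x := rfl
      rw [this, H]
    rw [hstep]
    have hmod : d.modify x 0 (· + (1 + condSum P x))
        = d.insert x (d.getD x 0 + (1 + condSum P x)) := rfl
    have hnd' : (d.modify x 0 (· + (1 + condSum P x))).keys.Nodup := by
      rw [hmod]; exact PySem.Dict.nodup_keys_insert d x _ hnd
    have H' : ∀ y, condSum (d.modify x 0 (· + (1 + condSum P x))).items y
        = condSum (stepP P x) y := by
      intro y
      rw [hmod, condSum_insert d hnd x _ y, H, stepP, condSum_append]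
      have : condSum [(x, 1 + condSum P x)] y
          = if x < y then 1 + condSum P x else 0 := by
        simp only [condSum, List.foldl_cons, List.foldl_nil]
        split_ifs <;> ring
      rw [this]
    have := ih (d.modify x 0 (· + (1 + condSum P x))) (tot + (1 + condSum P x))
      (stepP P x) hnd' H'
    have hsnd : sndSum (stepP P x) = sndSum P + (1 + condSum P x) := by
      simp [stepP, sndSum]
    omega

lemma count_alt_eq (t : List Int) : count_alt t = sndSum (pairs t) := by
  have h := countAlt_loop t PySem.Dict.empty 0 [] PySem.Dict.nodup_keys_empty
    (fun y => rfl)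
  simpa [sndSum, pairs] using h

-- ## A side
def innerSum (t dp : List Int) (m m' : Nat) : Int :=
  ((List.range m').map (fun (j : Nat) =>
    if PySem.List.pyGetD t (m : Int) 0 > PySem.List.pyGetD t (j : Int) 0
    then PySem.List.pyGetD dp (j : Int) 0 else 0)).sum

lemma set_append_cons {α : Type} (A : List α) (b v : α) (r : List α) :
    (A ++ b :: r).set A.length v = A ++ v :: r := by
  induction A with
  | nil => rfl
  | cons a A ih => simp [ih]

lemma map_eq_range_map {α β : Type} (L : List α) (g : α → β) (d : α) :
    L.map g = (List.range L.length).map (fun j => g (L.getD j d)) := by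
  apply List.ext_getElem
  · simp
  · intro j h1 h2
    simp only [List.getElem_map, List.getElem_range]
    rw [List.getD_eq_getElem _ _ (by simpa using h2)]

lemma inner_spec (t dp : List Int) (m : Nat) (hm : m < dp.length) :
    ∀ m' : Nat, m' ≤ m →
    (PySem.List.pyRange 0 (m' : Int) 1).foldl (countInner t (m : Int)) dp
      = PySem.List.pySetD dp (m : Int) (PySem.List.pyGetD dp (m : Int) 0 + innerSum t dp m m') := by
  intro m'
  induction m' with
  | zero =>
    intro _
    rw [PySem.List.pyRange_one_eq_nil (by omega), PySem.List.pySetD_natCast,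
      PySem.List.pyGetD_natCast, List.getD_eq_getElem _ _ hm]
    simp [innerSum, List.set_getElem_self]
  | succ k ih =>
    intro hk
    have hk' : k ≤ m := by omega
    have hcast : ((k + 1 : Nat) : Int) = (k : Int) + 1 := by push_cast; ring
    rw [hcast, PySem.List.pyRange_one_succ_right (by omega), List.foldl_append,
      List.foldl_cons, List.foldl_nil, ih hk']
    have hkm : ¬ (k = m) := by omega
    have hlen : m < (PySem.List.pySetD dp (m : Int)
        (PySem.List.pyGetD dp (m : Int) 0 + innerSum t dp m k)).length := by
      rw [PySem.List.pySetD_natCast]; simpa using hm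
    simp only [countInner]
    rw [PySem.List.pyGetD_pySetD_natCast dp m m _ 0 hm,
      PySem.List.pyGetD_pySetD_natCast dp m k _ 0 hm]
    simp only [if_neg hkm]
    have hsum : innerSum t dp m (k + 1) = innerSum t dp m k +
        (if PySem.List.pyGetD t (m : Int) 0 > PySem.List.pyGetD t (k : Int) 0
         then PySem.List.pyGetD dp (k : Int) 0 else 0) := by
      simp [innerSum, List.range_succ]
    split_ifs with hcond
    · rw [PySem.List.pySetD_natCast, PySem.List.pySetD_natCast, PySem.List.pySetD_natCast,
        List.set_set, hsum, if_pos hcond]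
      ring_nf
    · rw [hsum, if_neg hcond, add_zero]

lemma pairs_foldl_fst : ∀ (s : List Int) (P : List (Int × Int)),
    (s.foldl stepP P).map (·.1) = P.map (·.1) ++ s := by
  intro s
  induction s with
  | nil => intro P; simp
  | cons x s ih =>
    intro P
    simp only [List.foldl_cons, ih, stepP, List.map_append]
    simp

lemma pairs_foldl_length : ∀ (s : List Int) (P : List (Int × Int)),
    (s.foldl stepP P).length = P.length + s.length := by
  intro s
  induction s with
  | nil => intro P; simp
  | cons x s ih =>
    intro P
    simp only [List.foldl_cons, ih, stepP]
    simp; omega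

lemma pairs_fst (s : List Int) : (pairs s).map (·.1) = s := by
  simpa using pairs_foldl_fst s []

lemma pairs_length (s : List Int) : (pairs s).length = s.length := by
  simpa using pairs_foldl_length s []

lemma pairs_take_succ (t : List Int) (m : Nat) (hm : m < t.length) :
    pairs (t.take (m + 1)) = stepP (pairs (t.take m)) t[m] := by
  rw [List.take_add_one, List.getElem?_eq_getElem hm]
  simp only [Option.toList_some, pairs, List.foldl_append, List.foldl_cons, List.foldl_nil]

lemma getD_append_at {α : Type} (A : List α) (v : α) (r : List α) (d : α) (n : Nat)
    (h : n = A.length) : (A ++ v :: r).getD n d = v := by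
  subst h
  simp

-- state after processing outer iterations i = 1 .. m-1
def dpTot (t : List Int) (m : Nat) : List Int × Int :=
  ((pairs (t.take m)).map (·.2) ++ List.replicate (t.length - m) 1,
    sndSum (pairs (t.take m)))

lemma outer_step (t : List Int) (m : Nat) (hm : m < t.length) :
    countOuter t (dpTot t m) (m : Int) = dpTot t (m + 1) := by
  have hPmlen : (pairs (t.take m)).length = m := by
    rw [pairs_length, List.length_take]; omega
  have hAlen : ((pairs (t.take m)).map (·.2)).length = m := by
    rw [List.length_map, hPmlen]
  have hdplen : (dpTot t m).1.length = t.length := by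
    simp only [dpTot, List.length_append, List.length_replicate, hAlen]; omega
  have hm' : m < (dpTot t m).1.length := by omega
  have hrep : t.length - m = (t.length - (m + 1)) + 1 := by omega
  have hdp1 : (dpTot t m).1
      = (pairs (t.take m)).map (·.2) ++ 1 :: List.replicate (t.length - (m + 1)) 1 := by
    simp only [dpTot, hrep, List.replicate_succ]
  -- dp[m] = 1 before the update
  have hget_m : PySem.List.pyGetD (dpTot t m).1 (m : Int) 0 = 1 := by
    rw [PySem.List.pyGetD_natCast, hdp1]
    exact getD_append_at _ _ _ _ _ hAlen.symm
  -- entries below m are the dp-counts of the prefix pairs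
  have hget_j : ∀ j : Nat, j < m →
      PySem.List.pyGetD (dpTot t m).1 (j : Int) 0 = ((pairs (t.take m)).getD j (0, 0)).2 := by
    intro j hj
    have hjP : j < (pairs (t.take m)).length := by omega
    rw [PySem.List.pyGetD_natCast, hdp1]
    rw [List.getD_eq_getElem _ _ (by simp [hAlen]; omega)]
    rw [List.getElem_append_left (by rw [hAlen]; omega), List.getElem_map]
    rw [List.getD_eq_getElem _ _ hjP]
  have ht_j : ∀ j : Nat, j < m →
      PySem.List.pyGetD t (j : Int) 0 = ((pairs (t.take m)).getD j (0, 0)).1 := by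
    intro j hj
    have hjP : j < (pairs (t.take m)).length := by omega
    have hjt : j < (t.take m).length := by rw [List.length_take]; omega
    have h1 : ((pairs (t.take m)).map (·.1))[j]? = (t.take m)[j]? := by rw [pairs_fst]
    rw [List.getElem?_map, List.getElem?_eq_getElem hjP, List.getElem?_eq_getElem hjt] at h1
    have h2 : ((pairs (t.take m)).getD j (0, 0)).1 = (t.take m)[j] := by
      rw [List.getD_eq_getElem _ _ hjP]
      simpa using h1
    rw [h2, List.getElem_take, PySem.List.pyGetD_natCast,
      List.getD_eq_getElem _ _ (by omega)]
  have ht_m : PySem.List.pyGetD t (m : Int) 0 = t[m] := by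
    rw [PySem.List.pyGetD_natCast, List.getD_eq_getElem _ _ hm]
  -- the inner sum is condSum of the prefix pairs at t[m]
  have hsum : innerSum t (dpTot t m).1 m m = condSum (pairs (t.take m)) t[m] := by
    rw [condSum_eq_sum, map_eq_range_map (pairs (t.take m)) _ (0, 0), hPmlen]
    unfold innerSum
    apply congrArg
    apply List.map_congr_left
    intro j hj
    rw [List.mem_range] at hj
    rw [hget_j j hj, ht_j j hj, ht_m]
  have hv : PySem.List.pyGetD (dpTot t m).1 (m : Int) 0 + innerSum t (dpTot t m).1 m m
      = 1 + condSum (pairs (t.take m)) t[m] := by rw [hget_m, hsum]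
  have hinner := inner_spec t (dpTot t m).1 m hm' m (le_refl m)
  have hset : PySem.List.pySetD (dpTot t m).1 (m : Int)
        (1 + condSum (pairs (t.take m)) t[m])
      = (pairs (t.take (m + 1))).map (·.2)
          ++ List.replicate (t.length - (m + 1)) 1 := by
    rw [PySem.List.pySetD_natCast, hdp1]
    have := set_append_cons ((pairs (t.take m)).map (·.2)) 1
      (1 + condSum (pairs (t.take m)) t[m]) (List.replicate (t.length - (m + 1)) 1)
    rw [hAlen] at this
    rw [this, pairs_take_succ t m hm]
    simp [stepP]
  have hdp' : (PySem.List.pyRange 0 (m : Int) 1).foldl (countInner t (m : Int)) (dpTot t m).1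
      = (pairs (t.take (m + 1))).map (·.2) ++ List.replicate (t.length - (m + 1)) 1 := by
    rw [hinner, hv, hset]
  have hlen' : ((pairs (t.take (m + 1))).map (·.2)).length = m + 1 := by
    rw [List.length_map, pairs_length, List.length_take]; omega
  have hget' : PySem.List.pyGetD ((pairs (t.take (m + 1))).map (·.2)
      ++ List.replicate (t.length - (m + 1)) 1) (m : Int) 0
      = 1 + condSum (pairs (t.take m)) t[m] := by
    rw [PySem.List.pyGetD_natCast, pairs_take_succ t m hm]
    have hmap : (stepP (pairs (t.take m)) t[m]).map (·.2)
        = ((pairs (t.take m)).map (·.2)) ++ [1 + condSum (pairs (t.take m)) t[m]] := by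
      simp [stepP]
    rw [hmap, List.append_assoc, List.singleton_append]
    exact getD_append_at _ _ _ _ _ hAlen.symm
  simp only [countOuter]
  rw [hdp', hget']
  simp only [dpTot, Prod.mk.injEq]
  refine ⟨trivial, ?_⟩
  rw [pairs_take_succ t m hm]
  simp [sndSum, stepP]

lemma outer_all (t : List Int) (h : 1 ≤ t.length) : ∀ m : Nat, 1 ≤ m → m ≤ t.length →
    (PySem.List.pyRange 1 (m : Int) 1).foldl (countOuter t) (List.replicate t.length 1, 1)
      = dpTot t m := by
  intro m
  induction m with
  | zero => intro h1 _; exact absurd h1 (by norm_num)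
  | succ k ih =>
    intro _ hk1
    by_cases hk : k = 0
    · subst hk
      rw [show ((0 + 1 : Nat) : Int) = 1 by norm_num, PySem.List.pyRange_one_eq_nil (le_refl 1)]
      obtain ⟨x, r, rfl⟩ : ∃ x r, t = x :: r := by
        cases t with
        | nil => simp at h
        | cons x r => exact ⟨x, r, rfl⟩
      have hp : pairs ((x :: r).take (0 + 1)) = [(x, 1)] := by
        simp [pairs, stepP, condSum]
      simp only [List.foldl_nil, dpTot, hp]
      simp [sndSum, List.replicate_succ]
    · have hk1' : 1 ≤ k := by omega
      have hkt : k ≤ t.length := by omega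
      have hcast : ((k + 1 : Nat) : Int) = (k : Int) + 1 := by push_cast; ring
      rw [hcast, PySem.List.pyRange_one_succ_right (by exact_mod_cast hk1'),
        List.foldl_append, ih hk1' hkt, List.foldl_cons, List.foldl_nil]
      exact outer_step t k (by omega)

lemma count_eq (t : List Int) (h : t ≠ []) : count t = sndSum (pairs t) := by
  have h1 : 1 ≤ t.length := List.length_pos_of_ne_nil h
  unfold count
  rw [outer_all t h1 t.length h1 (le_refl _)]
  simp [dpTot]

-- ===== VERDICT =====
theorem count_spec : Claim_unchanged_count := by
  intro t _ hD
  rw [count_eq t hD, count_alt_eq]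

theorem count_changed : Claim_changed_count := by
  unfold Claim_changed_count; decide

theorem count_tight : Claim_exact_count := by
  intro t _ hD
  subst hD
  decide
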